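-- pv_equiv track=rewrite | github.com/yeargun/google-foobar-foobar-foobar | ff9 disorderly-escape/ff8 disorderly-escape.py | buildGCDTable
-- ===== SOURCE A (Python) =====
-- def buildGCDTable(n):
--     result = [[0 for x in range(n)] for y in range(n)]
--     for i in range(n):
--         for j in range(i,n):
--             if i == 0 or j == 0:
--                 result[i][j] = 1
--                 result[j][i] = 1
--             elif i == j:
--                 result[i][j] = i+1
--             else:
--                 result[i][j] = result[i][j-i-1]
--                 result[j][i] = result[i][j-i-1]
--     return result
-- ===== SOURCE B (Python) =====
-- import math
--
-- def buildGCDTable(n):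
--     # closed form: each cell is the gcd of its two one-based indices; no inter-cell recurrence
--     return [[math.gcd(i + 1, j + 1) for j in range(n)] for i in range(n)]
-- ===== Notes on version B (the rewrite author's own statement) =====
-- stated objective: simpler
-- what changed: A fills the table through a subtraction-GCD recurrence that reuses earlier cells (three branches, symmetric writes); B computes every cell independently by the closed form math.gcd of the two one-based indices, in one plain nested comprehension.
import Mathlib
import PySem

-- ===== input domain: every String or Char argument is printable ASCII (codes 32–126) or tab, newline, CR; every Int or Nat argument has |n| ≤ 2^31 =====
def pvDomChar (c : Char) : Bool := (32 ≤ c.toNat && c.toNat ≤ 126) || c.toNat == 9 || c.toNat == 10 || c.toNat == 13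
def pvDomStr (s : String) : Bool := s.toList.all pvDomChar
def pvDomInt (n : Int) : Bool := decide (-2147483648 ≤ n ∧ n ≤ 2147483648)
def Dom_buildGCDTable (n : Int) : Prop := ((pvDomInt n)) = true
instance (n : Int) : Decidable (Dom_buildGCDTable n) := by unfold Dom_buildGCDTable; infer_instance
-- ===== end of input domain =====

-- B replaces A's subtraction-GCD recurrence (which reuses earlier cells) by computing each
-- cell independently as the gcd of its one-based row and column indices; objective: simpler.

-- ===== PORT A =====
-- result[i][j]  (both indices always in range in A, so the defaulted forms are exact here)
def pvIdx2 (t : List (List Int)) (i j : Int) : Int :=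
  PySem.List.pyGetD (PySem.List.pyGetD t i []) j 0

-- result[i][j] = v
def pvSet2 (t : List (List Int)) (i j : Int) (v : Int) : List (List Int) :=
  PySem.List.pySetD t i (PySem.List.pySetD (PySem.List.pyGetD t i []) j v)

-- the inner-loop body of A, step for step
def pvBody (result : List (List Int)) (i j : Int) : List (List Int) :=
  if i = 0 ∨ j = 0 then
    pvSet2 (pvSet2 result i j 1) j i 1
  else if i = j then
    pvSet2 result i j (i + 1)
  else
    let r1 := pvSet2 result i j (pvIdx2 result i (j - i - 1))
    pvSet2 r1 j i (pvIdx2 r1 i (j - i - 1))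

def buildGCDTable (n : Int) : List (List Int) :=
  let init := (PySem.List.pyRange 0 n 1).map (fun _y =>
    (PySem.List.pyRange 0 n 1).map (fun _x => (0 : Int)))
  (PySem.List.pyRange 0 n 1).foldl (fun result i =>
    (PySem.List.pyRange i n 1).foldl (fun result j => pvBody result i j) result) init

-- ===== PORT B =====
def buildGCDTable_alt (n : Int) : List (List Int) :=
  (PySem.List.pyRange 0 n 1).map (fun i =>
    (PySem.List.pyRange 0 n 1).map (fun j => (Int.gcd (i + 1) (j + 1) : Int)))

-- ===== PRECONDITION & SPEC =====
def Spec_buildGCDTable (n : Int) (out : List (List Int)) : Prop := out = buildGCDTable_alt n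
instance (n : Int) (out : List (List Int)) : Decidable (Spec_buildGCDTable n out) := by unfold Spec_buildGCDTable; infer_instance

-- ===== CLAIM (what is proved, stated in full; the proofs are below) =====
def Claim_equal_buildGCDTable : Prop := ∀ (n : Int), Dom_buildGCDTable n → Spec_buildGCDTable n (buildGCDTable n)

-- ===== LEMMAS AND PROOFS =====

-- the gcd value a cell (a, b) finally holds
def pvG (a b : Nat) : Int := (Nat.gcd (a + 1) (b + 1) : Int)

-- table of an entry function, N × N
def pvTable (N : Nat) (f : Nat → Nat → Int) : List (List Int) :=
  (List.range N).map (fun a => (List.range N).map (fun b => f a b))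

-- the entry function after outer rows < i are done and inner columns < j of phase i are done
def pvF (i j : Nat) (a b : Nat) : Int :=
  if min a b < i ∨ (min a b = i ∧ max a b < j) then pvG a b else 0

lemma pvTable_congr (N : Nat) (f f' : Nat → Nat → Int)
    (h : ∀ a b, a < N → b < N → f a b = f' a b) : pvTable N f = pvTable N f' := by
  unfold pvTable
  refine List.map_congr_left (fun a ha => ?_)
  exact List.map_congr_left (fun b hb => h a b (List.mem_range.mp ha) (List.mem_range.mp hb))

lemma pvIdx2_table (N : Nat) (f : Nat → Nat → Int) (a b : Nat) (ha : a < N) (hb : b < N) :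
    pvIdx2 (pvTable N f) (a : Int) (b : Int) = f a b := by
  simp [pvIdx2, pvTable, List.getD_eq_getElem?_getD, ha, hb]

lemma pvSet2_table (N : Nat) (f : Nat → Nat → Int) (a b : Nat) (v : Int)
    (ha : a < N) (hb : b < N) :
    pvSet2 (pvTable N f) (a : Int) (b : Int) v
      = pvTable N (fun x y => if x = a ∧ y = b then v else f x y) := by
  unfold pvSet2 pvTable
  have hrow : PySem.List.pyGetD
      ((List.range N).map (fun a => (List.range N).map (fun b => f a b))) (a : Int) []
      = (List.range N).map (fun b => f a b) := by
    simp [List.getD_eq_getElem?_getD, ha]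
  rw [hrow, PySem.List.pySetD_natCast, PySem.List.pySetD_natCast]
  apply List.ext_getElem
  · simp
  · intro x h1 h2
    simp only [List.length_map, List.length_range] at h2
    rw [List.getElem_set]
    by_cases hx : a = x
    · rw [if_pos hx]
      subst hx
      simp only [List.getElem_map, List.getElem_range]
      apply List.ext_getElem
      · simp
      · intro y g1 g2
        simp only [List.length_map, List.length_range] at g2
        rw [List.getElem_set]
        simp only [List.getElem_map, List.getElem_range]
        by_cases hy : b = y
        · subst hy; simp
        · rw [if_neg hy]
          have : ¬ (y = b) := fun h => hy h.symm
          simp [this]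
    · rw [if_neg hx]
      simp only [List.getElem_map, List.getElem_range]
      refine List.map_congr_left (fun y _ => ?_)
      have : ¬ (x = a ∧ y = b) := fun h => hx h.1.symm
      rw [if_neg this]

-- gcd facts used by the branches
lemma pvG_left_zero (b : Nat) : pvG 0 b = 1 := by simp [pvG]
lemma pvG_right_zero (a : Nat) : pvG a 0 = 1 := by simp [pvG]
lemma pvG_diag (a : Nat) : pvG a a = (a : Int) + 1 := by
  unfold pvG
  rw [Nat.gcd_self]
  push_cast
  ring
lemma pvG_comm (a b : Nat) : pvG a b = pvG b a := by simp [pvG, Nat.gcd_comm]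
lemma pvG_sub (i j : Nat) (h1 : i < j) : pvG i (j - i - 1) = pvG i j := by
  unfold pvG
  have : j + 1 = (j - i - 1 + 1) + (i + 1) := by omega
  rw [this, Nat.gcd_add_self_right]

-- one inner-loop step turns phase (i, j) into phase (i, j+1)
lemma pvStep (N i j : Nat) (hij : i ≤ j) (hj : j < N) :
    pvBody (pvTable N (pvF i j)) (i : Int) (j : Int) = pvTable N (pvF i (j + 1)) := by
  have hi : i < N := lt_of_le_of_lt hij hj
  unfold pvBody
  by_cases h0 : (i : Int) = 0 ∨ (j : Int) = 0
  · have hi0 : i = 0 := by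
      rcases h0 with h | h
      · exact_mod_cast h
      · have : j = 0 := by exact_mod_cast h
        omega
    rw [if_pos h0]
    subst hi0
    rw [pvSet2_table N _ 0 j 1 hi hj, pvSet2_table N _ j 0 1 hj hi]
    apply pvTable_congr
    intro a b ha hb
    simp only [pvF]
    by_cases c1 : a = j ∧ b = 0
    · obtain ⟨rfl, rfl⟩ := c1
      rw [if_pos ⟨rfl, rfl⟩, if_pos (Or.inr ⟨by omega, by omega⟩), pvG_right_zero]
    · rw [if_neg c1]
      by_cases c2 : a = 0 ∧ b = j
      · obtain ⟨rfl, rfl⟩ := c2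
        rw [if_pos ⟨rfl, rfl⟩, if_pos (Or.inr ⟨by omega, by omega⟩), pvG_left_zero]
      · rw [if_neg c2]
        have hl : (min a b < 0 ∨ (min a b = 0 ∧ max a b < j))
            ↔ (min a b < 0 ∨ (min a b = 0 ∧ max a b < j + 1)) := by
          constructor <;> intro h <;> rcases h with h | h
          · exact Or.inl h
          · exact Or.inr ⟨h.1, by omega⟩
          · exact Or.inl h
          · refine Or.inr ⟨h.1, ?_⟩
            rcases Nat.lt_or_ge (max a b) j with hh | hh
            · exact hh
            · exfalso
              rcases Nat.le_total a b with hab | hab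
              · exact c2 ⟨by omega, by omega⟩
              · exact c1 ⟨by omega, by omega⟩
        rw [if_congr hl rfl rfl]
  · rw [if_neg h0]
    have hi1 : 1 ≤ i := by
      rcases Nat.eq_zero_or_pos i with h | h
      · exact absurd (Or.inl (by exact_mod_cast congrArg (Nat.cast : Nat → Int) h)) h0
      · exact h
    by_cases hd : (i : Int) = (j : Int)
    · have hij2 : i = j := by exact_mod_cast hd
      subst hij2
      rw [if_pos hd, pvSet2_table N _ i i _ hi hi]
      apply pvTable_congr
      intro a b ha hb
      simp only [pvF]
      by_cases c1 : a = i ∧ b = i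
      · obtain ⟨rfl, rfl⟩ := c1
        rw [if_pos ⟨rfl, rfl⟩, if_pos (Or.inr ⟨by omega, by omega⟩), pvG_diag]
      · rw [if_neg c1]
        have hl : (min a b < i ∨ (min a b = i ∧ max a b < i))
            ↔ (min a b < i ∨ (min a b = i ∧ max a b < i + 1)) := by
          constructor <;> intro h <;> rcases h with h | h
          · exact Or.inl h
          · exact Or.inr ⟨h.1, by omega⟩
          · exact Or.inl h
          · exfalso
            have : a = i ∧ b = i := by
              rcases Nat.le_total a b with hab | hab <;> constructor <;> omega
            exact c1 this
        rw [if_congr hl rfl rfl]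
    · rw [if_neg hd]
      have hlt : i < j := by
        have : i ≠ j := fun h => hd (by exact_mod_cast h)
        omega
      have hcast : (j : Int) - (i : Int) - 1 = ((j - i - 1 : Nat) : Int) := by push_cast; omega
      have hm : j - i - 1 < N := by omega
      -- the read cell is already written at phase (i, j)
      have hread : pvF i j i (j - i - 1) = pvG i j := by
        simp only [pvF]
        rw [if_pos]
        · exact pvG_sub i j hlt
        · rcases Nat.lt_or_ge (j - i - 1) i with h | h
          · exact Or.inl (by omega)
          · exact Or.inr ⟨by omega, by omega⟩
      show pvSet2 (pvSet2 (pvTable N (pvF i j)) (i : Int) (j : Int)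
            (pvIdx2 (pvTable N (pvF i j)) (i : Int) ((j : Int) - (i : Int) - 1))) (j : Int) (i : Int)
          (pvIdx2 (pvSet2 (pvTable N (pvF i j)) (i : Int) (j : Int)
            (pvIdx2 (pvTable N (pvF i j)) (i : Int) ((j : Int) - (i : Int) - 1))) (i : Int)
            ((j : Int) - (i : Int) - 1))
        = pvTable N (pvF i (j + 1))
      rw [hcast, pvIdx2_table N _ i (j - i - 1) hi hm, hread,
        pvSet2_table N _ i j _ hi hj]
      have hread2 : pvIdx2
          (pvTable N (fun x y => if x = i ∧ y = j then pvG i j else pvF i j x y))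
          (i : Int) ((j - i - 1 : Nat) : Int) = pvG i j := by
        rw [pvIdx2_table N _ i (j - i - 1) hi hm]
        split_ifs with h
        · rfl
        · exact hread
      rw [hread2, pvSet2_table N _ j i _ hj hi]
      apply pvTable_congr
      intro a b ha hb
      simp only [pvF]
      by_cases c1 : a = j ∧ b = i
      · obtain ⟨rfl, rfl⟩ := c1
        rw [if_pos ⟨rfl, rfl⟩, if_pos (Or.inr ⟨by omega, by omega⟩)]
        exact pvG_comm _ _
      · rw [if_neg c1]
        by_cases c2 : a = i ∧ b = j
        · obtain ⟨rfl, rfl⟩ := c2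
          rw [if_pos ⟨rfl, rfl⟩, if_pos (Or.inr ⟨by omega, by omega⟩)]
        · rw [if_neg c2]
          have hl : (min a b < i ∨ (min a b = i ∧ max a b < j))
              ↔ (min a b < i ∨ (min a b = i ∧ max a b < j + 1)) := by
            constructor <;> intro h <;> rcases h with h | h
            · exact Or.inl h
            · exact Or.inr ⟨h.1, by omega⟩
            · exact Or.inl h
            · refine Or.inr ⟨h.1, ?_⟩
              rcases Nat.lt_or_ge (max a b) j with hh | hh
              · exact hh
              · exfalso
                rcases Nat.le_total a b with hab | hab
                · exact c2 ⟨by omega, by omega⟩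
                · exact c1 ⟨by omega, by omega⟩
          rw [if_congr hl rfl rfl]

-- running the inner loop from column j to the end finishes phase i
lemma pvInner (N i : Nat) (hi : i < N) :
    ∀ (k j : Nat), i ≤ j → j + k = N →
      (PySem.List.pyRange (j : Int) (N : Int) 1).foldl
          (fun res jj => pvBody res (i : Int) jj) (pvTable N (pvF i j))
        = pvTable N (pvF i N) := by
  intro k
  induction k with
  | zero =>
    intro j hij hjk
    have : j = N := by omega
    subst this
    rw [PySem.List.pyRange_one_eq_nil (le_refl _)]
    rfl
  | succ k ih =>
    intro j hij hjk
    have hjN : j < N := by omega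
    rw [PySem.List.pyRange_one_cons (by exact_mod_cast hjN)]
    simp only [List.foldl_cons]
    rw [pvStep N i j hij hjN]
    have hc : ((j : Int) + 1) = ((j + 1 : Nat) : Int) := by push_cast; ring
    rw [hc]
    exact ih (j + 1) (by omega) (by omega)

-- finishing phase i leaves the table in the starting state of phase i+1
lemma pvPhase (N i : Nat) (hi : i < N) :
    pvTable N (pvF i N) = pvTable N (pvF (i + 1) (i + 1)) := by
  apply pvTable_congr
  intro a b ha hb
  simp only [pvF]
  have hl : (min a b < i ∨ (min a b = i ∧ max a b < N))
      ↔ (min a b < i + 1 ∨ (min a b = i + 1 ∧ max a b < i + 1)) := by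
    constructor <;> intro h <;> rcases h with h | h
    · exact Or.inl (by omega)
    · exact Or.inl (by omega)
    · rcases Nat.lt_or_ge (min a b) i with hh | hh
      · exact Or.inl hh
      · exact Or.inr ⟨by omega, by omega⟩
    · exact Or.inl (by omega)
  rw [if_congr hl rfl rfl]

-- the outer loop from row i to the end yields the fully written table
lemma pvOuter (N : Nat) :
    ∀ (k i : Nat), i + k = N →
      (PySem.List.pyRange (i : Int) (N : Int) 1).foldl
          (fun res ii => (PySem.List.pyRange ii (N : Int) 1).foldl
            (fun res jj => pvBody res ii jj) res) (pvTable N (pvF i i))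
        = pvTable N (pvF N N) := by
  intro k
  induction k with
  | zero =>
    intro i hik
    have : i = N := by omega
    subst this
    rw [PySem.List.pyRange_one_eq_nil (le_refl _)]
    rfl
  | succ k ih =>
    intro i hik
    have hiN : i < N := by omega
    rw [PySem.List.pyRange_one_cons (by exact_mod_cast hiN)]
    simp only [List.foldl_cons]
    rw [pvInner N i hiN (k + 1) i (le_refl i) (by omega), pvPhase N i hiN]
    have hc : ((i : Int) + 1) = ((i + 1 : Nat) : Int) := by push_cast; ring
    rw [hc]
    exact ih (i + 1) (by omega)

lemma pvAlt_eq_table (N : Nat) :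
    buildGCDTable_alt (N : Int) = pvTable N pvG := by
  unfold buildGCDTable_alt pvTable
  rw [PySem.List.pyRange_one]
  simp only [Int.sub_zero, Int.toNat_natCast, List.map_map]
  refine List.map_congr_left (fun a _ => ?_)
  simp only [Function.comp]
  refine List.map_congr_left (fun b _ => ?_)
  simp only [Function.comp_apply]
  simp only [pvG, Int.gcd]
  congr 1
  congr 1 <;> omega

lemma pvInit_eq (N : Nat) :
    ((PySem.List.pyRange 0 (N : Int) 1).map (fun _y =>
      (PySem.List.pyRange 0 (N : Int) 1).map (fun _x => (0 : Int))))
      = pvTable N (pvF 0 0) := by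
  unfold pvTable
  rw [PySem.List.pyRange_one]
  simp only [Int.sub_zero, Int.toNat_natCast, List.map_map]
  refine List.map_congr_left (fun a _ => ?_)
  refine List.map_congr_left (fun b _ => ?_)
  simp [pvF]

lemma pvFull (N : Nat) : pvTable N (pvF N N) = pvTable N pvG := by
  apply pvTable_congr
  intro a b ha hb
  simp only [pvF]
  rw [if_pos (Or.inl (by omega))]

-- ===== VERDICT (by name: the statement is the Claim_ definition above) =====
theorem buildGCDTable_spec : Claim_equal_buildGCDTable := by
  intro n _
  unfold Spec_buildGCDTable buildGCDTable
  by_cases hn : n ≤ 0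
  · rw [PySem.List.pyRange_one_eq_nil hn]
    simp [buildGCDTable_alt, PySem.List.pyRange_one_eq_nil hn]
  · have hN : n = ((n.toNat : Nat) : Int) := by omega
    rw [hN, pvInit_eq n.toNat]
    have h0 : ((0 : Nat) : Int) = (0 : Int) := rfl
    rw [← h0, pvOuter n.toNat n.toNat 0 (by omega), pvFull, ← pvAlt_eq_table]
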